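-- pv_equiv track=rewrite | github.com/sungju/pycrashext | modinfo.py | taint_str
-- ===== SOURCE A (Python) =====
-- taint_flags = [
--     [ 'P', 'G', True ],     # TAINT_PROPRIETARY_MODULE
--     [ 'F', '', True ],     # TAINT_FORCED_MODULE
--     [ 'S', '', False ],    # TAINT_CPU_OUT_OF_SPEC
--     [ 'R', '', False ],    # TAINT_FORCED_RMMOD
--     [ 'M', '', False ],    # TAINT_MACHINE_CHECK
--     [ 'B', '', False ],    # TAINT_BAD_PAGE
--     [ 'U', '', False ],    # TAINT_USER
--     [ 'D', '', False ],    # TAINT_DIE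
--     [ 'A', '', False ],    # TAINT_OVERRIDDEN_ACPI_TABLE
--     [ 'W', '', False ],    # TAINT_WARN
--     [ 'C', '', True ],     # TAINT_CRAP
--     [ 'I', '', False ],    # TAINT_FIRMWARE_WORKAROUND
--     [ 'O', '', True ],     # TAINT_OOT_MODULE
--     [ 'E', '', True ],     # TAINT_UNSIGNED_MODULE
--     [ 'L', '', False ],    # TAINT_SOFTLOCKUP
--     [ 'K', '', True ],     # TAINT_LIVEPATCH
--     [ '?', '', False ],    # TAINT_16
--     [ '?', '', False ],    # TAINT_17
--     [ '?', '', False ],    # TAINT_18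
--     [ '?', '', False ],    # TAINT_19
--     [ '?', '', False ],    # TAINT_20
--     [ '?', '', False ],    # TAINT_21
--     [ '?', '', False ],    # TAINT_22
--     [ '?', '', False ],    # TAINT_23
--     [ '?', '', False ],    # TAINT_24
--     [ '?', '', False ],    # TAINT_25
--     [ '?', '', False ],    # TAINT_26
--     [ '?', '', False ],    # TAINT_27
--     [ 'H', '', False ],    # TAINT_HARDWARE_UNSUPPORTED
--     [ 'T', '', True ],     # TAINT_TECH_PREVIEW
-- ]
--
-- def taint_str(tainted_mask):
--     result_str = ""
--
--     if tainted_mask == 0: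
--         result_str = "Not tainted"
--     else:
--         result_str = "Tainted: "
--         pos = 0
--         while tainted_mask != 0:
--             if (tainted_mask & 0x1) == 0x1:
--                 result_str = result_str + taint_flags[pos][0]
--             else:
--                 result_str = result_str + taint_flags[pos][1]
--             pos = pos + 1
--             tainted_mask = tainted_mask >> 1
--
--     return result_str
-- ===== SOURCE B (Python) =====
-- taint_flags = [
--     [ 'P', 'G', True ],     # TAINT_PROPRIETARY_MODULE
--     [ 'F', '', True ],     # TAINT_FORCED_MODULE
--     [ 'S', '', False ],    # TAINT_CPU_OUT_OF_SPEC
--     [ 'R', '', False ],    # TAINT_FORCED_RMMOD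
--     [ 'M', '', False ],    # TAINT_MACHINE_CHECK
--     [ 'B', '', False ],    # TAINT_BAD_PAGE
--     [ 'U', '', False ],    # TAINT_USER
--     [ 'D', '', False ],    # TAINT_DIE
--     [ 'A', '', False ],    # TAINT_OVERRIDDEN_ACPI_TABLE
--     [ 'W', '', False ],    # TAINT_WARN
--     [ 'C', '', True ],     # TAINT_CRAP
--     [ 'I', '', False ],    # TAINT_FIRMWARE_WORKAROUND
--     [ 'O', '', True ],     # TAINT_OOT_MODULE
--     [ 'E', '', True ],     # TAINT_UNSIGNED_MODULE
--     [ 'L', '', False ],    # TAINT_SOFTLOCKUP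
--     [ 'K', '', True ],     # TAINT_LIVEPATCH
--     [ '?', '', False ],    # TAINT_16
--     [ '?', '', False ],    # TAINT_17
--     [ '?', '', False ],    # TAINT_18
--     [ '?', '', False ],    # TAINT_19
--     [ '?', '', False ],    # TAINT_20
--     [ '?', '', False ],    # TAINT_21
--     [ '?', '', False ],    # TAINT_22
--     [ '?', '', False ],    # TAINT_23
--     [ '?', '', False ],    # TAINT_24
--     [ '?', '', False ],    # TAINT_25
--     [ '?', '', False ],    # TAINT_26
--     [ '?', '', False ],    # TAINT_27
--     [ 'H', '', False ],    # TAINT_HARDWARE_UNSUPPORTED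
--     [ 'T', '', True ],    # TAINT_TECH_PREVIEW
-- ]
--
-- def taint_str(tainted_mask):
--     # Every "unset" marker in taint_flags is the empty string except position 0
--     # ('G'), so only the SET bits of the mask contribute characters.  Visit the
--     # set bits from HIGH to LOW by repeatedly clearing the top bit, collect their
--     # flag characters, then emit the 'G' marker and reverse into low-to-high order.
--     if tainted_mask == 0:
--         return "Not tainted"
--     parts = []
--     m = tainted_mask
--     while m:
--         p = m.bit_length() - 1
--         parts.append(taint_flags[p][0])
--         m -= 1 << p
--     if tainted_mask & 1 == 0:
--         parts.append(taint_flags[0][1])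
--     return "Tainted: " + "".join(reversed(parts))
-- ===== Notes on version B (the rewrite author's own statement) =====
-- stated objective: alternative
-- what changed: Instead of A's destructive low-to-high shift loop that visits every bit position and concatenates a (possibly empty) marker per position, B visits only the SET bits, high to low, by repeatedly clearing the top bit (bit_length), collects their flag characters plus the lone non-empty unset marker 'G' for bit 0, and reverses the collected parts; correct because every unset marker except position 0 is the empty string.
import Mathlib
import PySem

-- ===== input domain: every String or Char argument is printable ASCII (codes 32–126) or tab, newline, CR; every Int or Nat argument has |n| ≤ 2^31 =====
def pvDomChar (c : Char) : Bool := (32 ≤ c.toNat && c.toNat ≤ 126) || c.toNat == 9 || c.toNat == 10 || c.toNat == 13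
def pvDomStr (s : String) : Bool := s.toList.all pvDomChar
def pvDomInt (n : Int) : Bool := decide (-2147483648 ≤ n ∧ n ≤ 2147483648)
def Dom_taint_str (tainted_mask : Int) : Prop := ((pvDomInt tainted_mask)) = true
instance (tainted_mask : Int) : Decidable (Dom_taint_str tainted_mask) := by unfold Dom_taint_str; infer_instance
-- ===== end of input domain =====

-- B replaces A's low-to-high shift loop over every bit position by a traversal of the SET
-- bits only (clearing the top bit each round), then a reverse; return value only.

-- shared module-level constant taint_flags (set/unset flag character per bit position)
def taintFlags : List (String × String) :=
  [("P", "G"), ("F", ""), ("S", ""), ("R", ""), ("M", ""), ("B", ""), ("U", ""), ("D", ""),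
   ("A", ""), ("W", ""), ("C", ""), ("I", ""), ("O", ""), ("E", ""), ("L", ""), ("K", ""),
   ("?", ""), ("?", ""), ("?", ""), ("?", ""), ("?", ""), ("?", ""), ("?", ""), ("?", ""),
   ("?", ""), ("?", ""), ("?", ""), ("?", ""), ("H", ""), ("T", "")]

-- ===== PORT A =====
-- A's while loop; fuel is only a totality guard (inside Pre_ the loop ends long before 64
-- steps; where Python raises IndexError, pyGet? is none and we stop — those inputs are outside Pre_).
def taintLoopA : Nat → Int → Int → String → String
  | 0, _, _, acc => acc
  | fuel + 1, mask, pos, acc =>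
    if mask = 0 then acc
    else
      if PySem.Int.band mask 1 = 1 then
        match PySem.List.pyGet? taintFlags pos with
        | none => acc   -- IndexError in Python (outside Pre_)
        | some fl => taintLoopA fuel (mask >>> (1 : Nat)) (pos + 1) (acc ++ fl.1)
      else
        match PySem.List.pyGet? taintFlags pos with
        | none => acc   -- IndexError in Python (outside Pre_)
        | some fl => taintLoopA fuel (mask >>> (1 : Nat)) (pos + 1) (acc ++ fl.2)

def taint_str (tainted_mask : Int) : String :=
  if tainted_mask = 0 then "Not tainted"
  else taintLoopA 64 tainted_mask 0 "Tainted: "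

-- ===== PORT B =====
-- B's while loop: repeatedly clear the TOP bit of m, collecting that bit's set-flag
-- character; fuel is only a totality guard (inside Pre_ at most 30 rounds; pyGet? none
-- = IndexError in Python — those inputs are outside Pre_).
-- fuel recursion written with Nat.rec; each round: p = m.bit_length() - 1 (inlined),
-- look up taint_flags[p] (Option.elim's first branch = IndexError, outside Pre_),
-- append its set-flag character and clear the top bit (m -= 1 << p)
def taintLoopB (fuel : Nat) : Int → List String → List String :=
  Nat.rec (fun _ parts => parts)
    (fun _ rec m parts =>
      if m = 0 then parts
      else
        (PySem.List.pyGet? taintFlags ((PySem.Int.bitLength m - 1 : Nat) : Int)).elim parts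
          (fun fl => rec (m - ((1 : Int) <<< (PySem.Int.bitLength m - 1))) (parts ++ [fl.1])))
    fuel

def taint_str_alt (tainted_mask : Int) : String :=
  if tainted_mask = 0 then "Not tainted"
  else
    -- taint_flags[0][1]: index 0 is always in range, so getD's default is never used
    "Tainted: " ++ PySem.Str.join ""
      (if PySem.Int.band tainted_mask 1 = 0 then
          taintLoopB 64 tainted_mask [] ++ [((PySem.List.pyGet? taintFlags 0).getD ("", "")).2]
        else taintLoopB 64 tainted_mask []).reverse

-- ===== PRECONDITION & SPEC =====
-- Pre_ excludes exactly the inputs where Python A raises IndexError: negative masks (the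
-- while-shift never reaches zero, so pos runs past the end of the flag table) and masks
-- with a set bit at or past the end of the flag table.
def Pre_taint_str (tainted_mask : Int) : Prop := 0 ≤ tainted_mask ∧ tainted_mask < 2 ^ 30
instance (tainted_mask : Int) : Decidable (Pre_taint_str tainted_mask) := by
  unfold Pre_taint_str; infer_instance
def pvWitness_taint_str : Int := (5)

def Spec_taint_str (tainted_mask : Int) (out : String) : Prop := out = taint_str_alt tainted_mask
instance (tainted_mask : Int) (out : String) : Decidable (Spec_taint_str tainted_mask out) := by
  unfold Spec_taint_str; infer_instance

-- ===== CLAIM (what is proved, stated in full; the proofs are below) =====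
def Claim_equal_taint_str : Prop := ∀ (tainted_mask : Int), Dom_taint_str tainted_mask → Pre_taint_str tainted_mask → Spec_taint_str tainted_mask (taint_str tainted_mask)

-- ===== LEMMAS AND PROOFS =====

-- common rendering of A's loop body: one flag character per remaining table entry,
-- reading the mask's bits low to high
def renderL : List (String × String) → Int → String
  | [], _ => ""
  | fl :: rest, m => (if PySem.Int.band m 1 = 1 then fl.1 else fl.2) ++ renderL rest (m >>> (1 : Nat))

-- flag pair at position p (total; in the proofs p is always within the table)
def flagAt (p : Nat) : String × String := taintFlags.getD p ("", "")

-- A's result bit by bit from the low end, on Nat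
def gN (m pos : Nat) : String :=
  if h : m = 0 then ""
  else (if m % 2 = 1 then (flagAt pos).1 else (flagAt pos).2) ++ gN (m / 2) (pos + 1)
termination_by m
decreasing_by exact Nat.div_lt_self (Nat.pos_of_ne_zero h) one_lt_two

-- set-flag characters of the SET bits only, low to high
def ascN (m pos : Nat) : List String :=
  if h : m = 0 then []
  else (if m % 2 = 1 then [(flagAt pos).1] else []) ++ ascN (m / 2) (pos + 1)
termination_by m
decreasing_by exact Nat.div_lt_self (Nat.pos_of_ne_zero h) one_lt_two

-- set-flag characters of the SET bits, high to low (B's traversal order)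
def descN (m : Nat) : List String :=
  if h : m = 0 then []
  else (flagAt m.log2).1 :: descN (m - 2 ^ m.log2)
termination_by m
decreasing_by exact Nat.sub_lt (Nat.pos_of_ne_zero h) (Nat.pow_pos (by norm_num))

theorem gN_zero (pos : Nat) : gN 0 pos = "" := by rw [gN]; simp

theorem ascN_zero (pos : Nat) : ascN 0 pos = [] := by rw [ascN]; simp

theorem descN_zero : descN 0 = [] := by rw [descN]; simp

theorem taintFlags_length : taintFlags.length = 30 := by decide

theorem snd_flagAt (p : Nat) (hp : 1 ≤ p) : (flagAt p).2 = "" := by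
  by_cases h : p < 30
  · interval_cases p <;> rfl
  · unfold flagAt
    rw [List.getD_eq_default]
    rw [taintFlags_length]; omega

theorem joinS_cons (a : String) (as : List String) :
    PySem.Str.join "" (a :: as) = a ++ PySem.Str.join "" as := by
  rw [PySem.Str.join, PySem.Str.join]
  have he : "".toList = ([] : List Char) := rfl
  have hj : ∀ (x : List Char) (xs : List (List Char)),
      PySem.Chars.join [] (x :: xs) = x ++ PySem.Chars.join [] xs := by
    intro x xs; cases xs <;> simp [PySem.Chars.join, List.intercalate]
  rw [List.map_cons, he, hj, String.ofList_append, String.ofList_toList]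

theorem joinS_nil : PySem.Str.join "" ([] : List String) = "" := by decide

theorem joinS_append (l1 l2 : List String) :
    PySem.Str.join "" (l1 ++ l2) = PySem.Str.join "" l1 ++ PySem.Str.join "" l2 := by
  induction l1 with
  | nil => rw [List.nil_append, joinS_nil]; exact String.empty_append.symm
  | cons a as ih => rw [List.cons_append, joinS_cons, joinS_cons, ih, String.append_assoc]

theorem shiftRight_one_eq_floordiv (m : Int) (h : 0 ≤ m) :
    m >>> (1 : Nat) = PySem.Int.floordiv m 2 := by
  obtain ⟨k, rfl⟩ := Int.eq_ofNat_of_zero_le h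
  have h1 : PySem.Int.floordiv (k : Int) 2 = ((k / 2 : Nat) : Int) := by
    exact_mod_cast PySem.Int.floordiv_natCast k 2
  rw [Int.shiftRight_eq_div_pow, h1]
  omega

theorem bitLength_zero_iff (m : Int) (h0 : 0 ≤ m) (h : PySem.Int.bitLength m = 0) : m = 0 := by
  have := PySem.Int.lt_two_pow_bitLength m
  rw [h] at this
  omega

theorem bitLength_le_of_lt (m : Int) (k : Nat) (h0 : 0 ≤ m) (hlt : m < ((2 ^ k : Nat) : Int)) :
    PySem.Int.bitLength m ≤ k := by
  by_contra hgt
  have hne : m ≠ 0 := by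
    intro hm; rw [hm] at hgt; simp [PySem.Int.bitLength_zero] at hgt
  have h1 : 2 ^ (PySem.Int.bitLength m - 1) ≤ m.natAbs :=
    PySem.Int.two_pow_bitLength_le m hne
  have h2 : (2 : Nat) ^ k ≤ 2 ^ (PySem.Int.bitLength m - 1) :=
    Nat.pow_le_pow_right (by norm_num) (by omega)
  have h3 : (2 : Nat) ^ k ≤ m.natAbs := le_trans h2 h1
  have h4 : (((2 : Nat) ^ k : Nat) : Int) ≤ (m.natAbs : Int) := by exact_mod_cast h3
  rw [Int.natAbs_of_nonneg h0] at h4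
  omega

theorem loopA_eq (fuel : Nat) : ∀ (m : Int) (pos : Nat) (acc : String),
    0 ≤ m → PySem.Int.bitLength m ≤ fuel → pos + PySem.Int.bitLength m ≤ 30 →
    taintLoopA fuel m (pos : Int) acc
      = acc ++ renderL ((taintFlags.drop pos).take (PySem.Int.bitLength m)) m := by
  induction fuel with
  | zero =>
    intro m pos acc h0 hf _
    have hm : m = 0 := bitLength_zero_iff m h0 (Nat.le_zero.mp hf)
    subst hm
    simp [taintLoopA, PySem.Int.bitLength_zero, renderL]
  | succ f ih =>
    intro m pos acc h0 hf hpos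
    by_cases hm : m = 0
    · subst hm
      simp [taintLoopA, PySem.Int.bitLength_zero, renderL]
    · have hmpos : 0 < m := lt_of_le_of_ne h0 (Ne.symm hm)
      have hbl : PySem.Int.bitLength m = PySem.Int.bitLength (PySem.Int.floordiv m 2) + 1 :=
        PySem.Int.bitLength_of_pos hmpos
      have hshift : m >>> (1 : Nat) = PySem.Int.floordiv m 2 := shiftRight_one_eq_floordiv m h0
      have hlt30 : pos < taintFlags.length := by rw [taintFlags_length]; omega
      have hget : PySem.List.pyGet? taintFlags (pos : Int) = some taintFlags[pos] := by
        simp [PySem.List.pyGet?_natCast, List.getElem?_eq_getElem hlt30]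
      have hdrop : taintFlags.drop pos = taintFlags[pos] :: taintFlags.drop (pos + 1) :=
        List.drop_eq_getElem_cons hlt30
      have h0' : (0 : Int) ≤ PySem.Int.floordiv m 2 := by
        rw [← hshift, Int.shiftRight_eq_div_pow]; positivity
      have ih' := fun acc' => ih (PySem.Int.floordiv m 2) (pos + 1) acc' h0' (by omega) (by omega)
      rw [hbl, hdrop, List.take_succ_cons]
      show taintLoopA (f + 1) m (pos : Int) acc = _
      rw [taintLoopA, PySem.Int.band_one]
      have hc : ((pos : Int) + 1) = ((pos + 1 : Nat) : Int) := by push_cast; ring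
      have hne : ¬ ((0 : Int) = 1) := by decide
      rcases PySem.Int.mod_two_eq m with hbit | hbit
      · simp only [hm, hbit, hget, if_false, renderL, PySem.Int.band_one, hne]
        rw [hc, hshift, ih', String.append_assoc]
      · simp only [hm, hbit, hget, if_false, if_true, renderL, PySem.Int.band_one]
        rw [hc, hshift, ih', String.append_assoc]

theorem renderL_gN (k : Nat) : ∀ pos : Nat, pos + PySem.Int.bitLength (k : Int) ≤ 30 →
    renderL ((taintFlags.drop pos).take (PySem.Int.bitLength (k : Int))) (k : Int) = gN k pos := by
  induction k using Nat.strong_induction_on with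
  | _ k ih =>
    intro pos hpos
    by_cases hk : k = 0
    · subst hk
      have hz : PySem.Int.bitLength ((0 : Nat) : Int) = 0 := by
        norm_num [PySem.Int.bitLength_zero]
      rw [hz, List.take_zero, gN_zero]
      rfl
    · have hkpos : 0 < k := Nat.pos_of_ne_zero hk
      have hbl : PySem.Int.bitLength (k : Int)
          = PySem.Int.bitLength ((k / 2 : Nat) : Int) + 1 :=
        PySem.Int.bitLength_natCast hkpos
      have hlt30 : pos < taintFlags.length := by rw [taintFlags_length]; omega
      have hdrop : taintFlags.drop pos = taintFlags[pos] :: taintFlags.drop (pos + 1) :=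
        List.drop_eq_getElem_cons hlt30
      have hflag : taintFlags[pos] = flagAt pos := by
        unfold flagAt; rw [List.getD_eq_getElem _ _ hlt30]
      have hband : PySem.Int.band (k : Int) 1 = ((k % 2 : Nat) : Int) := by
        have h1 : PySem.Int.band ((k : Nat) : Int) ((1 : Nat) : Int) = (((k &&& 1 : Nat)) : Int) :=
          PySem.Int.band_natCast k 1
        rw [Nat.and_one_is_mod] at h1
        exact_mod_cast h1
      have hsh : ((k : Int)) >>> (1 : Nat) = ((k / 2 : Nat) : Int) := by
        rw [Int.shiftRight_eq_div_pow]
        omega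
      rw [hbl, hdrop, List.take_succ_cons, renderL, hband, hsh,
        ih (k / 2) (Nat.div_lt_self hkpos one_lt_two) (pos + 1) (by omega)]
      conv_rhs => rw [gN]
      simp only [hk, dif_neg, not_false_iff]
      rw [hflag]
      rcases Nat.mod_two_eq_zero_or_one k with hbit | hbit
      · simp [hbit]
      · simp [hbit]

theorem gN_eq_join (m : Nat) : ∀ pos, 1 ≤ pos →
    gN m pos = PySem.Str.join "" (ascN m pos) := by
  induction m using Nat.strong_induction_on with
  | _ m ih =>
    intro pos hpos
    by_cases hm : m = 0
    · subst hm; rw [gN_zero, ascN_zero, joinS_nil]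
    · rw [gN, ascN]
      simp only [hm, dif_neg, not_false_iff]
      rw [joinS_append,
        ih (m / 2) (Nat.div_lt_self (Nat.pos_of_ne_zero hm) one_lt_two) (pos + 1) (by omega)]
      rcases Nat.mod_two_eq_zero_or_one m with hbit | hbit
      · simp only [hbit, show (0 : Nat) ≠ 1 by decide, if_false, joinS_nil]
        simp [snd_flagAt pos hpos]
      · simp only [hbit, if_true]
        rw [joinS_cons, joinS_nil, String.append_empty]

theorem asc_split : ∀ (t r pos : Nat), r < 2 ^ t →
    ascN (2 ^ t + r) pos = ascN r pos ++ [(flagAt (pos + t)).1] := by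
  intro t
  induction t with
  | zero =>
    intro r pos hr
    interval_cases r
    rw [ascN]
    simp [ascN_zero]
  | succ t ih =>
    intro r pos hr
    have hne : 2 ^ (t + 1) + r ≠ 0 := by positivity
    have hmod : (2 ^ (t + 1) + r) % 2 = r % 2 := by omega
    have hdiv : (2 ^ (t + 1) + r) / 2 = 2 ^ t + r / 2 := by omega
    have hr2 : r / 2 < 2 ^ t := by omega
    have hpt : pos + 1 + t = pos + (t + 1) := by omega
    rw [ascN]
    simp only [hne, dif_neg, not_false_iff, hmod, hdiv]
    rw [ih (r / 2) (pos + 1) hr2, hpt]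
    by_cases hr0 : r = 0
    · subst hr0
      simp [ascN_zero]
    · conv_rhs => rw [ascN]
      simp only [hr0, dif_neg, not_false_iff]
      simp [List.append_assoc]

theorem desc_eq_reverse (m : Nat) : descN m = (ascN m 0).reverse := by
  induction m using Nat.strong_induction_on with
  | _ m ih =>
    by_cases hm : m = 0
    · subst hm; simp [descN_zero, ascN_zero]
    · have h1 : 2 ^ m.log2 ≤ m := Nat.log2_self_le hm
      have h2 : m < 2 ^ (m.log2 + 1) := Nat.lt_log2_self
      have hsplit : m = 2 ^ m.log2 + (m - 2 ^ m.log2) := by omega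
      have hr : m - 2 ^ m.log2 < 2 ^ m.log2 := by omega
      have hlt : m - 2 ^ m.log2 < m :=
        Nat.sub_lt (Nat.pos_of_ne_zero hm) (Nat.pow_pos (by norm_num))
      rw [descN]
      simp only [hm, dif_neg, not_false_iff]
      rw [ih _ hlt]
      conv_rhs => rw [hsplit]
      rw [asc_split _ _ _ hr]
      simp

theorem taintLoopB_zero (m : Int) (parts : List String) : taintLoopB 0 m parts = parts := rfl

theorem taintLoopB_succ (f : Nat) (m : Int) (parts : List String) :
    taintLoopB (f + 1) m parts
      = if m = 0 then parts
        else
          (PySem.List.pyGet? taintFlags ((PySem.Int.bitLength m - 1 : Nat) : Int)).elim parts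
            (fun fl =>
              taintLoopB f (m - ((1 : Int) <<< (PySem.Int.bitLength m - 1)))
                (parts ++ [fl.1])) := rfl

theorem loopB_eq (fuel : Nat) : ∀ (m : Int) (parts : List String),
    0 ≤ m → PySem.Int.bitLength m ≤ fuel → PySem.Int.bitLength m ≤ 30 →
    taintLoopB fuel m parts = parts ++ descN m.toNat := by
  induction fuel with
  | zero =>
    intro m parts h0 hf _
    have hm : m = 0 := bitLength_zero_iff m h0 (Nat.le_zero.mp hf)
    subst hm
    rw [taintLoopB_zero, show ((0 : Int)).toNat = 0 from rfl, descN_zero, List.append_nil]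
  | succ f ih =>
    intro m parts h0 hf h30
    by_cases hm : m = 0
    · subst hm
      rw [taintLoopB_succ, if_pos rfl, show ((0 : Int)).toNat = 0 from rfl, descN_zero,
        List.append_nil]
    · obtain ⟨k, rfl⟩ := Int.eq_ofNat_of_zero_le h0
      have hk : k ≠ 0 := by exact_mod_cast hm
      set bl := PySem.Int.bitLength (k : Int) with hbl
      have hblpos : 1 ≤ bl := by
        rcases Nat.eq_zero_or_pos bl with h | h
        · exact absurd (bitLength_zero_iff _ h0 h) hm
        · exact h
      have hp29 : bl - 1 < taintFlags.length := by rw [taintFlags_length]; omega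
      have hget : PySem.List.pyGet? taintFlags ((bl - 1 : Nat) : Int)
          = some taintFlags[bl - 1] := by
        rw [PySem.List.pyGet?_natCast, List.getElem?_eq_getElem hp29]
      have hflag : taintFlags[bl - 1] = flagAt (bl - 1) := by
        unfold flagAt; rw [List.getD_eq_getElem _ _ hp29]
      have hle : 2 ^ (bl - 1) ≤ k := by
        have h := PySem.Int.two_pow_bitLength_le (k : Int) (by exact_mod_cast hm)
        rw [← hbl] at h
        simpa using h
      have hub : k < 2 ^ bl := by
        have h := PySem.Int.lt_two_pow_bitLength (k : Int)
        rw [← hbl] at h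
        simpa using h
      have hpow : ((1 : Int) <<< (bl - 1)) = ((2 ^ (bl - 1) : Nat) : Int) := by
        rw [Int.shiftLeft_eq]; push_cast; ring
      have hm' : (k : Int) - ((1 : Int) <<< (bl - 1)) = ((k - 2 ^ (bl - 1) : Nat) : Int) := by
        rw [hpow]; push_cast [hle]; ring
      have h0' : (0 : Int) ≤ ((k - 2 ^ (bl - 1) : Nat) : Int) := by positivity
      have hub' : ((k - 2 ^ (bl - 1) : Nat) : Int) < ((2 ^ (bl - 1) : Nat) : Int) := by
        have h2 : 2 ^ bl = 2 * 2 ^ (bl - 1) := by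
          conv_lhs => rw [show bl = (bl - 1) + 1 by omega]
          ring
        have : k - 2 ^ (bl - 1) < 2 ^ (bl - 1) := by omega
        exact_mod_cast this
      have hbl' : PySem.Int.bitLength ((k - 2 ^ (bl - 1) : Nat) : Int) ≤ bl - 1 :=
        bitLength_le_of_lt _ _ h0' hub'
      have hlog : k.log2 = bl - 1 := by
        have ha : bl - 1 ≤ k.log2 := (Nat.le_log2 hk).mpr hle
        have hb : k.log2 < bl := by rw [Nat.log2_lt hk]; exact hub
        omega
      have hdesc : descN k = (flagAt (bl - 1)).1 :: descN (k - 2 ^ (bl - 1)) := by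
        rw [descN]
        simp only [hk, dif_neg, not_false_iff, hlog]
      rw [taintLoopB_succ, if_neg hm, ← hbl, hget]
      simp only [Option.elim]
      rw [hflag, hm', ih _ _ h0' (by omega) (by omega)]
      rw [Int.toNat_natCast, Int.toNat_natCast, hdesc]
      simp

-- ===== VERDICT (by name: the statement is the Claim_ definition above) =====
theorem taint_str_spec : Claim_equal_taint_str := by
  intro mask _ hpre
  obtain ⟨h0, hlt⟩ := hpre
  unfold Spec_taint_str taint_str taint_str_alt
  by_cases hm : mask = 0
  · simp [hm]
  · simp only [hm, if_false]
    obtain ⟨k, rfl⟩ := Int.eq_ofNat_of_zero_le h0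
    have hk : k ≠ 0 := by exact_mod_cast hm
    have hbl30 : PySem.Int.bitLength (k : Int) ≤ 30 := by
      apply bitLength_le_of_lt _ _ h0
      exact_mod_cast hlt
    have hA := loopA_eq 64 (k : Int) 0 "Tainted: " h0 (by omega) (by omega)
    rw [Int.natCast_zero] at hA
    rw [hA, renderL_gN k 0 (by omega)]
    have hB := loopB_eq 64 (k : Int) [] h0 (by omega) hbl30
    rw [Int.toNat_natCast, List.nil_append] at hB
    rw [hB]
    have hG : ((PySem.List.pyGet? taintFlags 0).getD ("", "")).2 = "G" := by decide
    have hband : PySem.Int.band (k : Int) 1 = ((k % 2 : Nat) : Int) := by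
      have h1 : PySem.Int.band ((k : Nat) : Int) ((1 : Nat) : Int) = (((k &&& 1 : Nat)) : Int) :=
        PySem.Int.band_natCast k 1
      rw [Nat.and_one_is_mod] at h1
      exact_mod_cast h1
    have hgN : gN k 0
        = (if k % 2 = 1 then (flagAt 0).1 else (flagAt 0).2)
          ++ PySem.Str.join "" (ascN (k / 2) 1) := by
      rw [gN]
      simp only [hk, dif_neg, not_false_iff]
      rw [gN_eq_join (k / 2) 1 (by omega)]
    have hasc : ascN k 0 = (if k % 2 = 1 then [(flagAt 0).1] else []) ++ ascN (k / 2) 1 := by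
      rw [ascN]; simp [hk]
    rw [hgN, hband, hG]
    rcases Nat.mod_two_eq_zero_or_one k with hbit | hbit
    · simp only [hbit, Nat.cast_zero, eq_self_iff_true, if_true]
      rw [List.reverse_append, desc_eq_reverse, List.reverse_reverse,
        show ((["G"] : List String).reverse) = ["G"] from rfl, List.singleton_append,
        joinS_cons, hasc]
      simp only [hbit, show (0 : Nat) ≠ 1 by decide, if_false, List.nil_append]
      rw [show (flagAt 0).2 = "G" from rfl]
    · simp only [hbit, Nat.cast_one, one_ne_zero, if_false]
      rw [desc_eq_reverse, List.reverse_reverse, hasc]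
      simp only [hbit, eq_self_iff_true, if_true]
      rw [List.singleton_append, joinS_cons]
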